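-- pv_equiv track=rewrite | github.com/reasv/panoptikon | src/inference/utils.py | extract_index_from_content_disposition
-- ===== SOURCE A (Python) =====
-- from typing import List, Optional, Union
--
-- def extract_index_from_content_disposition(header: str) -> Optional[int]:
--     """Extract the 'index' from the Content-Disposition header."""
--     if not header:
--         return None
--     parts = header.split(";")
--     for part in parts:
--         part = part.strip()
--         if part.startswith("filename="):
--             try:
--                 return int(part.split("=")[1].strip().strip('"'))
--             except (IndexError, ValueError):
--                 return None
--     return None
-- ===== SOURCE B (Python) =====
-- from typing import Optional
--
--
-- def extract_index_from_content_disposition(header: str) -> Optional[int]: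
--     """Extract the 'index' from the Content-Disposition header."""
--     if not header:
--         return None
--     # Build a table of header parameters (first occurrence of each key wins),
--     # then consult it.
--     params = {}
--     for part in header.split(";"):
--         fields = part.strip().split("=")
--         if len(fields) >= 2 and fields[0] not in params:
--             params[fields[0]] = fields[1]
--     val = params.get("filename")
--     if val is None:
--         return None
--     try:
--         return int(val.strip().strip('"'))
--     except ValueError:
--         return None
-- ===== Notes on version B (the rewrite author's own statement) =====
-- stated objective: alternative
-- what changed: A scans the semicolon-separated parts and returns from inside the loop at the first part whose stripped form starts with the filename key; B instead builds a key-to-value parameter table over all parts (first occurrence of each key wins) and afterwards consults the table for the filename key.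
import Mathlib
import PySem

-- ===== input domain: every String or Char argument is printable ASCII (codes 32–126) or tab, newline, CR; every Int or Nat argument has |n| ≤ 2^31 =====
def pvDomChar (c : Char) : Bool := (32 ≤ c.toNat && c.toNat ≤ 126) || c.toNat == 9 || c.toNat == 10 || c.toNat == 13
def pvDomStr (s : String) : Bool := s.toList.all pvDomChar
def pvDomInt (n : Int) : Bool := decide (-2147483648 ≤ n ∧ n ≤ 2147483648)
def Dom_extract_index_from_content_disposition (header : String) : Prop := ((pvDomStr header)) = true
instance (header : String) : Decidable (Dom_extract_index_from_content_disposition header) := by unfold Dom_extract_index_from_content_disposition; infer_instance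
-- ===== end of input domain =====

-- B replaces A's scan-and-return-at-first-'filename='-part by building a parameter
-- table over all parts (first occurrence of each key wins) and then consulting it.

-- ===== PORT A =====
-- the for-loop of A: return at the first stripped part starting with "filename="
def pvALoop : List (List Char) → Option Int
  | [] => none
  | part :: rest =>
    let p := PySem.Chars.strip part
    if PySem.Chars.startswith p "filename=".toList then
      -- int(part.split("=")[1].strip().strip('"')); except (IndexError, ValueError) -> None
      match PySem.List.pyGet? (PySem.Chars.splitOn p ['=']) 1 with
      | none => none
      | some v => PySem.Int.ofChars? (PySem.Chars.stripChars (PySem.Chars.strip v) ['"'])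
    else pvALoop rest

def extract_index_from_content_disposition (header : String) : Option Int :=
  if header.toList = [] then none
  else pvALoop (PySem.Chars.splitOn header.toList [';'])

-- ===== PORT B =====
-- one step of B's table-building loop: record fields[0] -> fields[1], first occurrence wins
def pvBStep (d : PySem.Dict (List Char) (List Char)) (part : List Char) : PySem.Dict (List Char) (List Char) :=
  match PySem.Chars.splitOn (PySem.Chars.strip part) ['='] with
  | k :: v :: _ => if d.contains k then d else d.insert k v
  | _ => d

def extract_index_from_content_disposition_alt (header : String) : Option Int :=
  if header.toList = [] then none
  else
    match ((PySem.Chars.splitOn header.toList [';']).foldl pvBStep PySem.Dict.empty).get? "filename".toList with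
    | none => none
    | some v => PySem.Int.ofChars? (PySem.Chars.stripChars (PySem.Chars.strip v) ['"'])

-- ===== PRECONDITION & SPEC =====
def Spec_extract_index_from_content_disposition (header : String) (out : Option Int) : Prop := out = extract_index_from_content_disposition_alt header
instance (header : String) (out : Option Int) : Decidable (Spec_extract_index_from_content_disposition header out) := by unfold Spec_extract_index_from_content_disposition; infer_instance

-- ===== CLAIM (what is proved, stated in full; the proofs are below) =====
def Claim_equal_extract_index_from_content_disposition : Prop := ∀ (header : String), Dom_extract_index_from_content_disposition header → Spec_extract_index_from_content_disposition header (extract_index_from_content_disposition header)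

-- ===== LEMMAS AND PROOFS =====

-- reference form of PySem.Chars.splitOn · ['='] (fuel removed), for the proofs only
def pvRef : List Char → List Char → List (List Char)
  | [], cur => [cur.reverse]
  | c :: rest, cur => if c = '=' then cur.reverse :: pvRef rest [] else pvRef rest (c :: cur)

theorem pvGo_eq (fuel : Nat) : ∀ (l cur : List Char) (acc : List (List Char)), l.length < fuel →
    PySem.Chars.splitOn.go ['='] fuel l cur acc = acc.reverse ++ pvRef l cur := by
  induction fuel with
  | zero => intro l cur acc h; omega
  | succ n ih =>
    intro l cur acc h
    cases l with
    | nil => simp [PySem.Chars.splitOn.go, pvRef]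
    | cons c rest =>
      by_cases hc : c = '='
      · subst hc
        simp only [PySem.Chars.splitOn.go, List.isPrefixOf, pvRef]
        simp only [BEq.rfl, Bool.true_and, if_true]
        have hd : List.drop ['='].length ('=' :: rest) = rest := rfl
        rw [hd, ih rest [] (List.reverse cur :: acc) (by simpa using Nat.lt_of_succ_lt_succ h)]
        simp
      · simp only [PySem.Chars.splitOn.go, List.isPrefixOf, pvRef, if_neg hc]
        have hbe : (('=' : Char) == c) = false := beq_eq_false_iff_ne.mpr (fun he => hc he.symm)
        simp only [hbe, Bool.false_and]
        exact ih rest (c :: cur) acc (by simpa using Nat.lt_of_succ_lt_succ h)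

theorem pvSplitOn_eq_ref (s : List Char) : PySem.Chars.splitOn s ['='] = pvRef s [] := by
  have := pvGo_eq (s.length + 1) s [] [] (by omega)
  simpa [PySem.Chars.splitOn] using this

theorem pvRef_ne_nil (l cur : List Char) : pvRef l cur ≠ [] := by
  induction l generalizing cur with
  | nil => simp [pvRef]
  | cons c rest ih => by_cases hc : c = '=' <;> simp [pvRef, hc, ih]

theorem pvRef_append (u : List Char) : ∀ (t cur : List Char), '=' ∉ u →
    pvRef (u ++ '=' :: t) cur = (cur.reverse ++ u) :: pvRef t [] := by
  induction u with
  | nil => intro t cur _; simp [pvRef]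
  | cons c u' ih =>
    intro t cur h
    have hc : c ≠ '=' := by rintro rfl; exact h (by simp)
    simp only [List.cons_append, pvRef, if_neg hc]
    rw [ih t (c :: cur) (fun hm => h (by simp [hm]))]
    simp

theorem pvRef_inv : ∀ (s cur k v : List Char) (rest : List (List Char)),
    pvRef s cur = k :: v :: rest →
    ∃ u t, s = u ++ '=' :: t ∧ k = cur.reverse ++ u ∧ pvRef t [] = v :: rest := by
  intro s
  induction s with
  | nil => intro cur k v rest h; simp [pvRef] at h
  | cons c s' ih =>
    intro cur k v rest h
    by_cases hc : c = '='
    · subst hc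
      simp only [pvRef] at h
      rw [if_pos trivial] at h
      injection h with hk htl
      exact ⟨[], s', by simp, by simp [← hk], htl⟩
    · simp only [pvRef, if_neg hc] at h
      obtain ⟨u, t, hs, hk, hr⟩ := ih (c :: cur) k v rest h
      exact ⟨c :: u, t, by simp [hs], by simp [hk], hr⟩

-- the key used everywhere
theorem pvKey_split : ("filename=".toList : List Char) = "filename".toList ++ ['='] := by decide

-- (a) a part that starts with "filename=" splits into "filename" :: v :: rest
theorem pvFields_of_startswith (p : List Char)
    (h : PySem.Chars.startswith p "filename=".toList = true) :
    ∃ v rest, pvRef p [] = "filename".toList :: v :: rest := by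
  rw [PySem.Chars.startswith_iff] at h
  obtain ⟨t, ht⟩ := h
  rw [pvKey_split] at ht
  have hp : p = "filename".toList ++ '=' :: t := by simpa using ht.symm
  rw [hp, pvRef_append "filename".toList t [] (by decide)]
  rcases hl : pvRef t [] with _ | ⟨v, rest⟩
  · exact absurd hl (pvRef_ne_nil t [])
  · exact ⟨v, rest, by simp⟩

-- (b) conversely, fields = "filename" :: v :: rest forces the startswith test
theorem pvStartswith_of_fields (p v : List Char) (rest : List (List Char))
    (h : pvRef p [] = "filename".toList :: v :: rest) :
    PySem.Chars.startswith p "filename=".toList = true := by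
  obtain ⟨u, t, hs, hk, _⟩ := pvRef_inv p [] _ v rest h
  rw [PySem.Chars.startswith_iff, pvKey_split]
  refine ⟨t, ?_⟩
  rw [hs]
  simp at hk
  rw [← hk]
  simp

-- the dict value for "filename", once set, survives the rest of the loop
theorem pvFoldl_preserves (parts : List (List Char)) :
    ∀ (d : PySem.Dict (List Char) (List Char)) (v : List Char),
    d.get? "filename".toList = some v →
    (parts.foldl pvBStep d).get? "filename".toList = some v := by
  induction parts with
  | nil => intro d v h; simpa using h
  | cons part rest ih =>
    intro d v h
    simp only [List.foldl_cons]
    apply ih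
    simp only [pvBStep]
    rcases hf : PySem.Chars.splitOn (PySem.Chars.strip part) ['='] with _ | ⟨k, _ | ⟨v', ktail⟩⟩
    · exact h
    · exact h
    · show (if d.contains k = true then d else d.insert k v').get? "filename".toList = some v
      by_cases hc : PySem.Dict.contains d k = true
      · rw [if_pos hc]; exact h
      · have hk : k ≠ "filename".toList := by
          rintro rfl
          rw [PySem.Dict.contains_eq_isSome_get?, h] at hc
          simp at hc
        rw [if_neg hc, PySem.Dict.get?_insert_of_ne _ _ (fun he => hk (Eq.symm he))]
        exact h

-- main loop invariant: table-lookup after the fold = A's first-match scan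
theorem pvMain (parts : List (List Char)) :
    ∀ (d : PySem.Dict (List Char) (List Char)),
    d.contains "filename".toList = false →
    (match (parts.foldl pvBStep d).get? "filename".toList with
     | none => none
     | some v => PySem.Int.ofChars? (PySem.Chars.stripChars (PySem.Chars.strip v) ['"'])) =
    pvALoop parts := by
  induction parts with
  | nil =>
    intro d h
    simp only [List.foldl_nil, pvALoop]
    rw [(PySem.Dict.get?_eq_none_iff_contains d _).2 h]
  | cons part rest ih =>
    intro d h
    simp only [List.foldl_cons]
    by_cases hs : PySem.Chars.startswith (PySem.Chars.strip part) "filename=".toList = true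
    · obtain ⟨v, vrest, hf⟩ := pvFields_of_startswith _ hs
      have hstep : pvBStep d part = d.insert "filename".toList v := by
        have hred : pvBStep d part =
            if d.contains "filename".toList = true then d
            else d.insert "filename".toList v := by
          simp only [pvBStep, pvSplitOn_eq_ref, hf]
        rw [hred, h]
        simp
      rw [hstep]
      have hg := pvFoldl_preserves rest (d.insert "filename".toList v) v
        (PySem.Dict.get?_insert_self d _ v)
      simp only [hg, pvALoop]
      simp [pvSplitOn_eq_ref, hf, PySem.List.pyGet?, PySem.List.pyIdx?]
      intro hcon
      exact Bool.noConfusion (hs.symm.trans hcon)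
    · have hA : pvALoop (part :: rest) = pvALoop rest := by
        simp only [pvALoop]
        rw [if_neg hs]
      have hc : (pvBStep d part).contains "filename".toList = false := by
        simp only [pvBStep, pvSplitOn_eq_ref]
        rcases hf : pvRef (PySem.Chars.strip part) [] with _ | ⟨k, _ | ⟨v', krest⟩⟩
        · exact h
        · exact h
        · show (if d.contains k = true then d else d.insert k v').contains "filename".toList = false
          have hk : k ≠ "filename".toList :=
            fun hkk => hs (pvStartswith_of_fields _ v' krest (hkk ▸ hf))
          by_cases hck : PySem.Dict.contains d k = true
          · rw [if_pos hck]; exact h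
          · rw [if_neg hck, PySem.Dict.contains_insert]
            have hbk : (("filename".toList : List Char) == k) = false :=
              beq_eq_false_iff_ne.mpr (fun he => hk (Eq.symm he))
            rw [hbk, Bool.false_or]
            exact h
      rw [hA]
      exact ih (pvBStep d part) hc

-- ===== VERDICT (by name: the statement is the Claim_ definition above) =====
theorem extract_index_from_content_disposition_spec : Claim_equal_extract_index_from_content_disposition := by
  intro header _
  unfold Spec_extract_index_from_content_disposition
  unfold extract_index_from_content_disposition extract_index_from_content_disposition_alt
  by_cases he : header.toList = []
  · simp [he]
  · rw [if_neg he, if_neg he]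
    rw [← pvMain (PySem.Chars.splitOn header.toList [';']) PySem.Dict.empty (PySem.Dict.contains_empty _)]
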